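-- pv_equiv track=rewrite | github.com/mlesnews/lumina-oss | scripts/python/shrink_mental_health_verifier.py | _detect_error_repetition
-- ===== SOURCE A (Python) =====
-- from typing import Dict, List, Any, Optional, Tuple
--
-- def _detect_error_repetition(
--
--     workflow_data: Dict[str, Any],
--     previous_workflows: Optional[List[Dict[str, Any]]]
-- ) -> bool:
--     """Detect repetition of the same errors"""
--     if not previous_workflows:
--         return False
--
--     current_errors = [str(e.get("type", "")) for e in workflow_data.get("errors", [])]
--
--     # Check if same error types appeared in previous workflows
--     for prev_workflow in previous_workflows[-5:]:  # Check last 5 workflows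
--         prev_errors = [str(e.get("type", "")) for e in prev_workflow.get("errors", [])]
--         common_errors = set(current_errors) & set(prev_errors)
--         if len(common_errors) > 0:
--             return True
--
--     return False
-- ===== SOURCE B (Python) =====
-- def _detect_error_repetition(workflow_data, previous_workflows):
--     """Detect repetition of the same errors (index-then-stream variant)."""
--     if not previous_workflows:
--         return False
--     seen = set()
--     for prev_workflow in previous_workflows[-5:]:
--         for e in prev_workflow.get("errors", []):
--             seen.add(str(e.get("type", "")))
--     return any(str(e.get("type", "")) in seen
--                for e in workflow_data.get("errors", []))
-- ===== Notes on version B (the rewrite author's own statement) =====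
-- stated objective: alternative
-- what changed: A intersects the current error-type set with each of up to five per-workflow sets, returning early on the first non-empty intersection; B builds no current set and performs no intersection at all: it indexes the recent workflows' error types into one hash set and then streams the current errors once, testing each type's membership with an early-exit any().
import Mathlib
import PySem

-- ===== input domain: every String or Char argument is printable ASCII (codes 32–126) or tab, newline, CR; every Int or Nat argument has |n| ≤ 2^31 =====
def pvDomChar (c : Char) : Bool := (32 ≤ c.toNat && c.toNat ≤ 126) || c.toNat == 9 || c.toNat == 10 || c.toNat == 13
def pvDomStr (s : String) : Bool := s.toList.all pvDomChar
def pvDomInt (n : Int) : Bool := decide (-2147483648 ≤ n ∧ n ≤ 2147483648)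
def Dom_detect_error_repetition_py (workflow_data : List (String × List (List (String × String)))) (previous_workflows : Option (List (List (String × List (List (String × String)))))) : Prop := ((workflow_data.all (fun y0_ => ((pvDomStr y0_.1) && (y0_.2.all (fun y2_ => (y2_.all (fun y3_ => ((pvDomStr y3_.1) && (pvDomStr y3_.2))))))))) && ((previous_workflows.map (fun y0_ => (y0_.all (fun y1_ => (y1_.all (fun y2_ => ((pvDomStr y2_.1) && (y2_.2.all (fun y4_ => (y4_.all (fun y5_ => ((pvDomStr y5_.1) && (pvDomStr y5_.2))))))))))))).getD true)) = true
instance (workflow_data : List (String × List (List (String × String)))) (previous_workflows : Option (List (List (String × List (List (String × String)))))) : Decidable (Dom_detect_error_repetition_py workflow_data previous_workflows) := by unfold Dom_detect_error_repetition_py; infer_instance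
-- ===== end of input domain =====

-- B replaces A's per-workflow set intersections (with early return) by indexing the recent
-- workflows' error types into one set and streaming the current errors once with an
-- early-exit membership test; alternative decomposition, same result.

-- ===== PORT A =====
-- A's for-loop over previous_workflows[-5:] with 'return True' on the first non-empty intersection
def pvLoopA (current_errors : List String) : List (List (String × List (List (String × String)))) → Bool
  | [] => false
  | prev_workflow :: rest =>
    let prev_errors := (PySem.Dict.getD ⟨prev_workflow⟩ "errors" []).map
      (fun e => PySem.Dict.getD ⟨e⟩ "type" "")
    let common_errors := PySem.Set.inter (PySem.Set.ofList current_errors)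
      (PySem.Set.ofList prev_errors)
    if PySem.Set.len common_errors > 0 then true else pvLoopA current_errors rest

def detect_error_repetition_py (workflow_data : List (String × List (List (String × String)))) (previous_workflows : Option (List (List (String × List (List (String × String)))))) : Bool :=
  match previous_workflows with
  | none => false
  | some ws =>
    if ws.isEmpty then false
    else
      let current_errors := (PySem.Dict.getD ⟨workflow_data⟩ "errors" []).map
        (fun e => PySem.Dict.getD ⟨e⟩ "type" "")
      pvLoopA current_errors (PySem.List.slice ws (some (-5)) none)

-- ===== PORT B =====
def detect_error_repetition_py_alt (workflow_data : List (String × List (List (String × String)))) (previous_workflows : Option (List (List (String × List (List (String × String)))))) : Bool :=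
  match previous_workflows with
  | none => false
  | some ws =>
    if ws.isEmpty then false
    else
      -- index the recent workflows' error types into one set
      let seen := (PySem.List.slice ws (some (-5)) none).foldl
        (fun acc prev_workflow =>
          (PySem.Dict.getD ⟨prev_workflow⟩ "errors" []).foldl
            (fun acc2 e => PySem.Set.add acc2 (PySem.Dict.getD ⟨e⟩ "type" "")) acc)
        PySem.Set.empty
      -- stream the current errors once, early-exit membership test (any(...))
      (PySem.Dict.getD ⟨workflow_data⟩ "errors" []).any
        (fun e => PySem.Set.contains seen (PySem.Dict.getD ⟨e⟩ "type" ""))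

-- ===== PRECONDITION & SPEC =====
def Spec_detect_error_repetition_py (workflow_data : List (String × List (List (String × String)))) (previous_workflows : Option (List (List (String × List (List (String × String)))))) (out : Bool) : Prop := out = detect_error_repetition_py_alt workflow_data previous_workflows
instance (workflow_data : List (String × List (List (String × String)))) (previous_workflows : Option (List (List (String × List (List (String × String)))))) (out : Bool) : Decidable (Spec_detect_error_repetition_py workflow_data previous_workflows out) := by unfold Spec_detect_error_repetition_py; infer_instance

-- ===== CLAIM =====
def Claim_equal_detect_error_repetition_py : Prop := ∀ (workflow_data : List (String × List (List (String × String)))) (previous_workflows : Option (List (List (String × List (List (String × String)))))), Dom_detect_error_repetition_py workflow_data previous_workflows → Spec_detect_error_repetition_py workflow_data previous_workflows (detect_error_repetition_py workflow_data previous_workflows)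

-- ===== LEMMAS AND PROOFS =====
-- error types of one workflow
def pvTypes (w : List (String × List (List (String × String)))) : List String :=
  (PySem.Dict.getD ⟨w⟩ "errors" []).map (fun e => PySem.Dict.getD ⟨e⟩ "type" "")

theorem pvCommon_iff (cur prev : List String) :
    PySem.Set.len (PySem.Set.inter (PySem.Set.ofList cur) (PySem.Set.ofList prev)) > 0 ↔
    ∃ x ∈ cur, x ∈ prev := by
  unfold PySem.Set.len
  rw [gt_iff_lt]
  rw [show (0 : Int) < ((PySem.Set.inter (PySem.Set.ofList cur) (PySem.Set.ofList prev)).length : Int) ↔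
      0 < (PySem.Set.inter (PySem.Set.ofList cur) (PySem.Set.ofList prev)).length by exact_mod_cast Iff.rfl]
  rw [List.length_pos_iff_exists_mem]
  constructor
  · rintro ⟨x, hx⟩
    rw [PySem.Set.mem_inter, PySem.Set.mem_ofList, PySem.Set.mem_ofList] at hx
    exact ⟨x, hx.1, hx.2⟩
  · rintro ⟨x, h1, h2⟩
    exact ⟨x, by rw [PySem.Set.mem_inter, PySem.Set.mem_ofList, PySem.Set.mem_ofList]; exact ⟨h1, h2⟩⟩

theorem pvLoopA_eq_true_iff (cur : List String)
    (ws : List (List (String × List (List (String × String))))) :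
    pvLoopA cur ws = true ↔ ∃ w ∈ ws, ∃ x ∈ cur, x ∈ pvTypes w := by
  induction ws with
  | nil => simp [pvLoopA]
  | cons w rest ih =>
    simp only [pvLoopA]
    split_ifs with hc
    · simp only [true_iff, List.mem_cons]
      rw [pvCommon_iff] at hc
      exact ⟨w, Or.inl rfl, hc⟩
    · rw [ih]
      rw [pvCommon_iff] at hc
      simp only [List.mem_cons]
      constructor
      · rintro ⟨v, hv, hx⟩; exact ⟨v, Or.inr hv, hx⟩
      · rintro ⟨v, hv | hv, hx⟩
        · exact absurd (hv ▸ hx) (by simpa [pvTypes] using hc)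
        · exact ⟨v, hv, hx⟩

theorem pvSeen_mem (ws : List (List (String × List (List (String × String)))))
    (acc : PySem.Set String) (x : String) :
    x ∈ ws.foldl
      (fun acc prev_workflow =>
        (PySem.Dict.getD ⟨prev_workflow⟩ "errors" []).foldl
          (fun acc2 e => PySem.Set.add acc2 (PySem.Dict.getD ⟨e⟩ "type" "")) acc)
      acc ↔ x ∈ acc ∨ ∃ w ∈ ws, x ∈ pvTypes w := by
  induction ws generalizing acc with
  | nil => simp
  | cons w rest ih =>
    rw [List.foldl_cons, ih, PySem.Set.mem_foldl_add]
    simp only [List.mem_cons, pvTypes, List.mem_map]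
    constructor
    · rintro ((h | ⟨e, he, hx⟩) | ⟨v, hv, hx⟩)
      · exact Or.inl h
      · exact Or.inr ⟨w, Or.inl rfl, e, he, hx.symm⟩
      · exact Or.inr ⟨v, Or.inr hv, hx⟩
    · rintro (h | ⟨v, hv | hv, hx⟩)
      · exact Or.inl (Or.inl h)
      · subst hv; obtain ⟨e, he, hx⟩ := hx; exact Or.inl (Or.inr ⟨e, he, hx.symm⟩)
      · exact Or.inr ⟨v, hv, hx⟩

-- ===== VERDICT =====
theorem detect_error_repetition_py_spec : Claim_equal_detect_error_repetition_py := by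
  intro wd pw _
  unfold Spec_detect_error_repetition_py
  cases pw with
  | none => rfl
  | some ws =>
    by_cases h : ws.isEmpty = true
    · simp [detect_error_repetition_py, detect_error_repetition_py_alt, h]
    · simp only [detect_error_repetition_py, detect_error_repetition_py_alt, h,
        Bool.false_eq_true, if_false]
      rw [Bool.eq_iff_iff, pvLoopA_eq_true_iff, List.any_eq_true]
      constructor
      · rintro ⟨w, hw, x, hx, hxt⟩
        obtain ⟨e, he, hex⟩ := List.mem_map.mp hx
        refine ⟨e, he, ?_⟩
        rw [PySem.Set.contains_iff, pvSeen_mem, hex]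
        exact Or.inr ⟨w, hw, hxt⟩
      · rintro ⟨e, he, hc⟩
        rw [PySem.Set.contains_iff, pvSeen_mem] at hc
        rcases hc with h0 | ⟨w, hw, hxt⟩
        · exact absurd h0 (by simp [PySem.Set.empty])
        · exact ⟨w, hw, PySem.Dict.getD ⟨e⟩ "type" "",
            List.mem_map.mpr ⟨e, he, rfl⟩, hxt⟩
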